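-- pv_equiv track=rewrite | github.com/aaronGeb/competitive-programming | A2SV Remote Contest #8 05-Apr-2025/B - Mostly Red but Mostly Blue 326761.py | can_paint_sequence
-- ===== SOURCE A (Python) =====
-- def can_paint_sequence(n, arr):
--     arr.sort()
--
--     red_sum = arr[-1]
--     red_count = 1
--
--     blue_sum = arr[0]
--     blue_count = 1
--
--     left = 1
--     right = n - 2
--
--     while left <= right:
--         blue_sum += arr[left]
--         blue_count += 1
--         left += 1
--
--         if blue_count > red_count and blue_sum < red_sum:
--             return "YES"
--
--         red_sum += arr[right]
--         red_count += 1
--         right -= 1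
--
--     return "NO"
-- ===== SOURCE B (Python) =====
-- def can_paint_sequence(n, arr):
--     arr.sort()
--     pre = [0]
--     for x in arr:
--         pre.append(pre[-1] + x)
--     top = arr[-1]
--     for t in range(1, (n - 1) // 2 + 1):
--         if pre[t + 1] < top + pre[n - 1] - pre[n - t]:
--             return "YES"
--     return "NO"
-- ===== Notes on version B (the rewrite author's own statement) =====
-- stated objective: alternative
-- what changed: Replaces the two converging pointers with four pieces of running state by a prefix-sum table built once; each candidate split t in range(1,(n-1)//2+1) is judged by the closed-form comparison pre[t+1] < top + pre[n-1] - pre[n-t], and the always-true count comparison is dropped.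
-- outside the precondition, e.g. on can_paint_sequence(100, [1, 1, 10]): A returns 'YES', B raises IndexError
import Mathlib
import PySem

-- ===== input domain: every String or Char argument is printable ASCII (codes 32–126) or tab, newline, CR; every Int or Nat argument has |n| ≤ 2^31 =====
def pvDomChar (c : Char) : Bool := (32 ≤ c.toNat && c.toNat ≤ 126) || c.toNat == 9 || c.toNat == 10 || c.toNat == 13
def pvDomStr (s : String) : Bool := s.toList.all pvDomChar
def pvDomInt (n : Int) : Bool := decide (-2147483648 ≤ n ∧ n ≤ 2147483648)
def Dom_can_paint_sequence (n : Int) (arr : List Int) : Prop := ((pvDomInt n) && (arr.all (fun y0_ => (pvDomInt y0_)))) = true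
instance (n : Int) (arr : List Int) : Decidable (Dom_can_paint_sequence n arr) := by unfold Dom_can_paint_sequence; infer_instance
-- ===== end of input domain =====

-- B replaces A's two converging pointers (running sums/counts) by a prefix-sum table and a
-- closed-form comparison per split; same cost ("alternative"). Both A and B sort arr in place
-- (same mutation); the equivalence proved here is about the return value.


-- ===== PORT A =====
-- A's while loop; list indexing via pyGetD (exact under Pre_, which guarantees every index in range)
def pvLoopA (s : List Int) (blue_sum blue_count red_sum red_count left right : Int) : String :=
  if left ≤ right then
    let bs := blue_sum + PySem.List.pyGetD s left 0
    let bc := blue_count + 1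
    if bc > red_count ∧ bs < red_sum then "YES"
    else pvLoopA s bs bc (red_sum + PySem.List.pyGetD s right 0) (red_count + 1) (left + 1) (right - 1)
  else "NO"
termination_by (right + 1 - left).toNat
decreasing_by omega

def can_paint_sequence (n : Int) (arr : List Int) : String :=
  let s := PySem.List.sorted arr (fun x => x) false
  pvLoopA s (PySem.List.pyGetD s 0 0) 1 (PySem.List.pyGetD s (-1) 0) 1 1 (n - 2)

-- ===== PORT B =====
-- pre = [0]; for x in arr: pre.append(pre[-1] + x)
def pvBuildPre (s : List Int) : List Int :=
  s.foldl (fun p x => p ++ [PySem.List.pyGetD p (-1) 0 + x]) [0]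

-- for t in range(1, (n-1)//2 + 1): if pre[t+1] < top + pre[n-1] - pre[n-t]: return "YES"
def pvLoopB (pre : List Int) (top n : Int) : List Int → String
  | [] => "NO"
  | t :: ts =>
    if PySem.List.pyGetD pre (t + 1) 0 <
        top + PySem.List.pyGetD pre (n - 1) 0 - PySem.List.pyGetD pre (n - t) 0 then "YES"
    else pvLoopB pre top n ts

def can_paint_sequence_alt (n : Int) (arr : List Int) : String :=
  let s := PySem.List.sorted arr (fun x => x) false
  let pre := pvBuildPre s
  pvLoopB pre (PySem.List.pyGetD s (-1) 0) n
    (PySem.List.pyRange 1 (PySem.Int.floordiv (n - 1) 2 + 1) 1)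

-- ===== PRECONDITION & SPEC =====
-- Pre_ excludes empty arr and n > len(arr)+1: n is declared to be the length of arr, and on such
-- malformed inputs A indexes out of range (IndexError) except when an accidental early "YES" fires
-- before the bad read, while B's prefix table cannot be addressed at n-1 and raises.
def Pre_can_paint_sequence (n : Int) (arr : List Int) : Prop :=
  arr ≠ [] ∧ n ≤ (arr.length : Int) + 1
instance (n : Int) (arr : List Int) : Decidable (Pre_can_paint_sequence n arr) := by
  unfold Pre_can_paint_sequence; infer_instance

def pvWitness_can_paint_sequence : Int × List Int := (3, [1, 2, 3])

def Spec_can_paint_sequence (n : Int) (arr : List Int) (out : String) : Prop := out = can_paint_sequence_alt n arr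
instance (n : Int) (arr : List Int) (out : String) : Decidable (Spec_can_paint_sequence n arr out) := by unfold Spec_can_paint_sequence; infer_instance

-- ===== CLAIM (what is proved, stated in full; the proofs are below) =====
def Claim_equal_can_paint_sequence : Prop := ∀ (n : Int) (arr : List Int), Dom_can_paint_sequence n arr → Pre_can_paint_sequence n arr → Spec_can_paint_sequence n arr (can_paint_sequence n arr)

-- ===== LEMMAS AND PROOFS =====

-- the prefix table is the list of take-sums
lemma pvBuildPre_eq (s : List Int) :
    pvBuildPre s = (List.range (s.length + 1)).map (fun i => (s.take i).sum) := by
  induction s using List.reverseRecOn with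
  | nil => simp [pvBuildPre]
  | append_singleton s x ih =>
    have step : pvBuildPre (s ++ [x]) =
        pvBuildPre s ++ [PySem.List.pyGetD (pvBuildPre s) (-1) 0 + x] := by
      simp [pvBuildPre, List.foldl_append]
    rw [step, ih]
    have hrange : List.range (s.length + 1) = List.range s.length ++ [s.length] :=
      List.range_succ
    have hlast : PySem.List.pyGetD
        ((List.range (s.length + 1)).map (fun i => (s.take i).sum)) (-1) 0 = s.sum := by
      rw [hrange, List.map_append]
      simp [PySem.List.pyGetD_neg_one_append_singleton]
    rw [hlast]
    have hrange2 : List.range (s.length + 1 + 1) =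
        List.range (s.length + 1) ++ [s.length + 1] := List.range_succ
    rw [List.length_append, List.length_singleton, hrange2, List.map_append]
    congr 1
    · apply List.map_congr_left
      intro i hi
      have : i ≤ s.length := by
        have := List.mem_range.mp hi; omega
      rw [List.take_append_of_le_length this]
    · simp

lemma pvPre_get (s : List Int) (i : Int) (h0 : 0 ≤ i) (hl : i ≤ (s.length : Int)) :
    PySem.List.pyGetD (pvBuildPre s) i 0 = (s.take i.toNat).sum := by
  rw [pvBuildPre_eq]
  have hi : i = ((i.toNat : Nat) : Int) := by omega
  rw [hi, PySem.List.pyGetD_natCast]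
  have hlt : i.toNat < ((List.range (s.length + 1)).map (fun i => (s.take i).sum)).length := by
    simp; omega
  rw [List.getD_eq_getElem _ _ hlt]
  simp
  have h7 : (max i 0).toNat = i.toNat := by omega
  rw [h7]

-- the main loop correspondence: A's state at left = k equals B's scan from t = k
lemma pvLoop_eq (s : List Int) (n top : Int) (hn : n ≤ (s.length : Int) + 1) (fuel : Nat) :
    ∀ k : Int, 1 ≤ k → (PySem.Int.floordiv (n - 1) 2 + 1 - k).toNat ≤ fuel →
    pvLoopA s ((s.take k.toNat).sum) k
        (top + (s.take (n - 1).toNat).sum - (s.take (n - k).toNat).sum) k k (n - 1 - k)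
      = pvLoopB (pvBuildPre s) top n
          (PySem.List.pyRange k (PySem.Int.floordiv (n - 1) 2 + 1) 1) := by
  induction fuel with
  | zero =>
    intro k hk hfuel
    have hub : PySem.Int.floordiv (n - 1) 2 + 1 ≤ k := by omega
    have hkr : ¬ (k ≤ n - 1 - k) := by
      intro hle
      have : k ≤ PySem.Int.floordiv (n - 1) 2 :=
        (PySem.Int.le_floordiv_iff_mul_le (by omega : (0:Int) < 2)).mpr (by omega)
      omega
    rw [pvLoopA, if_neg hkr, PySem.List.pyRange_one_eq_nil hub, pvLoopB]
  | succ m ih =>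
    intro k hk hfuel
    by_cases hkr : k ≤ n - 1 - k
    · have hkfd : k ≤ PySem.Int.floordiv (n - 1) 2 :=
        (PySem.Int.le_floordiv_iff_mul_le (by omega : (0:Int) < 2)).mpr (by omega)
      have hklen : k < (s.length : Int) := by omega
      have hcons : PySem.List.pyRange k (PySem.Int.floordiv (n - 1) 2 + 1) 1 =
          k :: PySem.List.pyRange (k + 1) (PySem.Int.floordiv (n - 1) 2 + 1) 1 :=
        PySem.List.pyRange_one_cons (by omega)
      rw [hcons, pvLoopA, if_pos hkr, pvLoopB]
      -- identify A's new blue sum with pre[k+1]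
      have hsk : PySem.List.pyGetD s k 0 = s[k.toNat]'(by omega) :=
        PySem.List.pyGetD_eq_getElem _ _ (by omega) hklen
      have hblue : (s.take k.toNat).sum + PySem.List.pyGetD s k 0
          = (s.take (k + 1).toNat).sum := by
        rw [hsk]
        have h1 : (k + 1).toNat = k.toNat + 1 := by omega
        rw [h1, List.sum_take_succ s k.toNat (by omega)]
      have hblueB : PySem.List.pyGetD (pvBuildPre s) (k + 1) 0 = (s.take (k + 1).toNat).sum :=
        pvPre_get s (k + 1) (by omega) (by omega)
      have hredB1 : PySem.List.pyGetD (pvBuildPre s) (n - 1) 0 = (s.take (n - 1).toNat).sum :=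
        pvPre_get s (n - 1) (by omega) (by omega)
      have hredB2 : PySem.List.pyGetD (pvBuildPre s) (n - k) 0 = (s.take (n - k).toNat).sum :=
        pvPre_get s (n - k) (by omega) (by omega)
      by_cases hc : (s.take (k + 1).toNat).sum <
          top + (s.take (n - 1).toNat).sum - (s.take (n - k).toNat).sum
      · rw [if_pos (⟨by omega, by rw [hblue]; exact hc⟩ : (k + 1 > k ∧ _)),
          if_pos (by rw [hblueB, hredB1, hredB2]; exact hc)]
      · rw [if_neg (by intro h; exact hc (hblue ▸ h.2)),
          if_neg (by rw [hblueB, hredB1, hredB2]; exact hc)]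
        -- A's new red sum: add s[n-1-k], which extends the take at n-(k+1) to n-k
        have hrs : top + (s.take (n - 1).toNat).sum - (s.take (n - k).toNat).sum
              + PySem.List.pyGetD s (n - 1 - k) 0
            = top + (s.take (n - 1).toNat).sum - (s.take (n - (k + 1)).toNat).sum := by
          have hidx : PySem.List.pyGetD s (n - 1 - k) 0 = s[(n - 1 - k).toNat]'(by omega) :=
            PySem.List.pyGetD_eq_getElem _ _ (by omega) (by omega)
          have h2 : (n - k).toNat = (n - (k + 1)).toNat + 1 := by omega
          have h3 := List.sum_take_succ s (n - (k + 1)).toNat (by omega)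
          have h4 : s[(n - 1 - k).toNat]'(by omega) = s[(n - (k + 1)).toNat]'(by omega) := by
            congr 1; omega
          rw [hidx, h4]; rw [h2, h3]; ring
        have := ih (k + 1) (by omega) (by omega)
        rw [hblue, hrs]
        have h5 : n - 1 - k - 1 = n - 1 - (k + 1) := by ring
        rw [h5]
        exact this
    · have hub : PySem.Int.floordiv (n - 1) 2 + 1 ≤ k := by
        by_contra h
        have : k ≤ PySem.Int.floordiv (n - 1) 2 := by omega
        have := (PySem.Int.le_floordiv_iff_mul_le (by omega : (0:Int) < 2)).mp this
        omega
      rw [pvLoopA, if_neg hkr, PySem.List.pyRange_one_eq_nil hub, pvLoopB]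

-- ===== VERDICT (by name: the statement is the Claim_ definition above) =====
theorem can_paint_sequence_spec : Claim_equal_can_paint_sequence := by
  unfold Claim_equal_can_paint_sequence
  intro n arr _ hpre
  obtain ⟨hne, hn⟩ := hpre
  unfold Spec_can_paint_sequence can_paint_sequence can_paint_sequence_alt
  set s := PySem.List.sorted arr (fun x => x) false with hs
  show pvLoopA s (PySem.List.pyGetD s 0 0) 1 (PySem.List.pyGetD s (-1) 0) 1 1 (n - 2)
      = pvLoopB (pvBuildPre s) (PySem.List.pyGetD s (-1) 0) n
          (PySem.List.pyRange 1 (PySem.Int.floordiv (n - 1) 2 + 1) 1)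
  have hlen : s.length = arr.length := PySem.List.length_sorted arr _ _
  have hsne : s ≠ [] := by
    intro h
    apply hne
    have : arr.length = 0 := by rw [← hlen, h]; rfl
    exact List.length_eq_zero_iff.mp this
  have hblue0 : PySem.List.pyGetD s 0 0 = (s.take (1 : Int).toNat).sum := by
    obtain ⟨h, t, hst⟩ := List.exists_cons_of_ne_nil hsne
    rw [hst]
    simp [PySem.List.pyGetD_zero_cons]
  have h := pvLoop_eq s n (PySem.List.pyGetD s (-1) 0) (by omega)
    (PySem.Int.floordiv (n - 1) 2 + 1 - 1).toNat 1 (by omega) (by omega)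
  rw [show PySem.List.pyGetD s (-1) 0 + (s.take (n - 1).toNat).sum - (s.take (n - 1).toNat).sum
      = PySem.List.pyGetD s (-1) 0 from by ring] at h
  rw [hblue0, show n - 2 = n - 1 - 1 from by ring]
  exact h
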